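-- pv_equiv track=rewrite | github.com/Dyanavio/Python-1 | HW/Hw-1/src/hw-1.py | sumInBetween
-- ===== SOURCE A (Python) =====
-- def sumInBetween(matrix):
--     minIndice = minInMatrix(matrix)
--     maxIndice = maxInMatrix(matrix)
--     start = []
--     end = []
--     sum = 0
--
--     if minIndice[0] == maxIndice[0]:
--         if(minIndice[1] < maxIndice[1]):
--             start = minIndice
--             end = maxIndice
--         else:
--             start = maxIndice
--             end = minIndice
--     else:
--         if minIndice[0] < maxIndice[0]:
--             start = minIndice
--             end = maxIndice
--         else:
--             start = maxIndice
--             end = minIndice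
--
--     for i in range(start[0], end[0] + 1):
--         for j in range(start[1] + 1, end[1]):
--             sum += matrix[i][j]
--
--     return sum
--
-- def minInMatrix(matrix):
--     min = matrix[0][0]
--     index1 = 0
--     index2 = 0
--     for i in range(0, len(matrix)):
--         for j in range(0, len(matrix)):
--             if matrix[i][j] < min:
--                 min = matrix[i][j]
--                 index1 = i
--                 index2 = j
--     return [index1, index2]
--
-- def maxInMatrix(matrix):
--     max = matrix[0][0]
--     index1 = 0
--     index2 = 0
--     for i in range(0, len(matrix)):
--         for j in range(0, len(matrix)):
--             if matrix[i][j] > max: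
--                 max = matrix[i][j]
--                 index1 = i
--                 index2 = j
--     return [index1, index2]
-- ===== SOURCE B (Python) =====
-- def sumInBetween(matrix):
--     n = len(matrix)
--     # flatten the n x n square into (value, i, j) triples once, and let the
--     # builtin min/max (first extremal, keyed on the value) pick the corners
--     cells = [(matrix[i][j], i, j) for i in range(n) for j in range(n)]
--     _, r1, c1 = min(cells, key=lambda t: t[0])
--     _, r2, c2 = max(cells, key=lambda t: t[0])
--     if (r2, c2) < (r1, c1):
--         r1, c1, r2, c2 = r2, c2, r1, c1
--     lo, hi = c1 + 1, c2
--     if lo >= hi: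
--         return 0
--     # per-row prefix sums: the strip of each row is a difference of two prefixes
--     total = 0
--     for row in matrix[r1:r2 + 1]:
--         acc = 0
--         pref = [0]
--         for v in row:
--             acc += v
--             pref.append(acc)
--         total += pref[hi] - pref[lo]
--     return total
-- ===== Notes on version B (the rewrite author's own statement) =====
-- stated objective: alternative
-- what changed: B flattens the square into (value,i,j) triples and lets the builtin first-extremal min/max pick both corners, orders them by tuple comparison, and replaces the inner column summation loop by per-row prefix sums, returning each row's strip as a difference of two prefix values (with an explicit empty-strip early return).
import Mathlib
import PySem

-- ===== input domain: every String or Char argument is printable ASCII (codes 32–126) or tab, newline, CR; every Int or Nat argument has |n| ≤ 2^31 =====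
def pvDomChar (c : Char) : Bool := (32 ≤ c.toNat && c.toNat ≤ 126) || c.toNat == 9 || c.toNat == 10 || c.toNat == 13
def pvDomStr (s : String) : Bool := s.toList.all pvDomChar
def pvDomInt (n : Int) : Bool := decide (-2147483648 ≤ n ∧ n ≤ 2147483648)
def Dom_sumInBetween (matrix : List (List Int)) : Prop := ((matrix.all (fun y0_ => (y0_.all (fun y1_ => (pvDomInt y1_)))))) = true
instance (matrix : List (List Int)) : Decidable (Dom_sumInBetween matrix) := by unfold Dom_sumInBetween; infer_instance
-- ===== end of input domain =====

-- B picks both corners with the builtin first-extremal min/max over flattened (value,i,j)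
-- triples, orders them by tuple comparison, and sums each row's strip as a difference of
-- two per-row prefix sums (objective: alternative; same asymptotic cost).

-- matrix[i][j] (exact for indices admitted by Pre_, where Python indexing returns a value)
def cell (matrix : List (List Int)) (i j : Int) : Int :=
  PySem.List.pyGetD (PySem.List.pyGetD matrix i []) j 0

-- ===== PORT A =====
def minInMatrix (matrix : List (List Int)) : List Int :=
  let n : Int := matrix.length
  let s := (PySem.List.pyRange 0 n 1).foldl (fun s i =>
      (PySem.List.pyRange 0 n 1).foldl (fun s j =>
        if cell matrix i j < s.1 then (cell matrix i j, i, j) else s) s)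
    (cell matrix 0 0, 0, 0)
  [s.2.1, s.2.2]

def maxInMatrix (matrix : List (List Int)) : List Int :=
  let n : Int := matrix.length
  let s := (PySem.List.pyRange 0 n 1).foldl (fun s i =>
      (PySem.List.pyRange 0 n 1).foldl (fun s j =>
        if cell matrix i j > s.1 then (cell matrix i j, i, j) else s) s)
    (cell matrix 0 0, 0, 0)
  [s.2.1, s.2.2]

def sumInBetween (matrix : List (List Int)) : Int :=
  let minIndice := minInMatrix matrix
  let maxIndice := maxInMatrix matrix
  let se : List Int × List Int :=
    if PySem.List.pyGetD minIndice 0 0 = PySem.List.pyGetD maxIndice 0 0 then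
      if PySem.List.pyGetD minIndice 1 0 < PySem.List.pyGetD maxIndice 1 0 then
        (minIndice, maxIndice)
      else (maxIndice, minIndice)
    else
      if PySem.List.pyGetD minIndice 0 0 < PySem.List.pyGetD maxIndice 0 0 then
        (minIndice, maxIndice)
      else (maxIndice, minIndice)
  (PySem.List.pyRange (PySem.List.pyGetD se.1 0 0) (PySem.List.pyGetD se.2 0 0 + 1) 1).foldl
    (fun s i =>
      (PySem.List.pyRange (PySem.List.pyGetD se.1 1 0 + 1) (PySem.List.pyGetD se.2 1 0) 1).foldl
        (fun s j => s + cell matrix i j) s) 0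

-- ===== PORT B =====
-- the comprehension 'cells = [(matrix[i][j], i, j) for i in range(n) for j in range(n)]'
def cellsOf (matrix : List (List Int)) : List (Int × Int × Int) :=
  ((PySem.List.pyRange 0 (matrix.length : Int) 1).map (fun i =>
     (PySem.List.pyRange 0 (matrix.length : Int) 1).map (fun j =>
       (cell matrix i j, i, j)))).flatten

-- the per-row prefix-sum loop 'pref = [0]; for v in row: acc += v; pref.append(acc)'
def prefList (row : List Int) : List Int :=
  (row.foldl (fun st v => (st.1 + v, st.2 ++ [st.1 + v])) ((0 : Int), [(0 : Int)])).2

def sumInBetween_alt (matrix : List (List Int)) : Int :=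
  let m1 := (PySem.List.min? (cellsOf matrix) (fun t => t.1)).getD (0, 0, 0)
  let m2 := (PySem.List.max? (cellsOf matrix) (fun t => t.1)).getD (0, 0, 0)
  -- Python tuple comparison (r2, c2) < (r1, c1), ported by hand (exact: lexicographic on int pairs)
  let s := if m2.2.1 < m1.2.1 ∨ (m2.2.1 = m1.2.1 ∧ m2.2.2 < m1.2.2)
           then (m2.2, m1.2) else (m1.2, m2.2)
  let lo := s.1.2 + 1
  let hi := s.2.2
  if hi ≤ lo then 0
  else
    (PySem.List.slice matrix (some s.1.1) (some (s.2.1 + 1))).foldl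
      (fun total row =>
        total + (PySem.List.pyGetD (prefList row) hi 0 - PySem.List.pyGetD (prefList row) lo 0)) 0

-- ===== PRECONDITION & SPEC =====
-- Pre_ excludes exactly the inputs where A raises IndexError: the empty matrix
-- (matrix[0][0]) and matrices with a row shorter than len(matrix) (the square scan).
def Pre_sumInBetween (matrix : List (List Int)) : Prop :=
  matrix ≠ [] ∧ ∀ row ∈ matrix, matrix.length ≤ row.length
instance (matrix : List (List Int)) : Decidable (Pre_sumInBetween matrix) := by
  unfold Pre_sumInBetween; infer_instance

def pvWitness_sumInBetween : List (List Int) := [[1, 9, 2], [4, -3, 5], [6, 7, 8]]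

def Spec_sumInBetween (matrix : List (List Int)) (out : Int) : Prop := out = sumInBetween_alt matrix
instance (matrix : List (List Int)) (out : Int) : Decidable (Spec_sumInBetween matrix out) := by unfold Spec_sumInBetween; infer_instance

-- ===== CLAIM (what is proved, stated in full; the proofs are below) =====
def Claim_equal_sumInBetween : Prop := ∀ (matrix : List (List Int)), Dom_sumInBetween matrix → Pre_sumInBetween matrix → Spec_sumInBetween matrix (sumInBetween matrix)

-- ===== LEMMAS AND PROOFS =====

-- folds preserve an invariant
theorem foldl_invariant {α γ : Type} (P : α → Prop) (l : List γ) (f : α → γ → α)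
    (init : α) (h0 : P init) (hstep : ∀ s c, c ∈ l → P s → P (f s c)) :
    P (l.foldl f init) := by
  induction l generalizing init with
  | nil => exact h0
  | cons x xs ih =>
      refine ih (f init x) (hstep init x (by simp) h0) ?_
      intro s c hc hs
      exact hstep s c (by simp [hc]) hs

theorem foldl_congr_of_mem {α γ : Type} (l : List γ) (f g : α → γ → α) (init : α)
    (H : ∀ s c, c ∈ l → f s c = g s c) : l.foldl f init = l.foldl g init := by
  induction l generalizing init with
  | nil => rfl
  | cons x xs ih =>
      simp only [List.foldl]
      rw [H init x (by simp)]
      exact ih _ (fun s c hc => H s c (by simp [hc]))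

-- range-indexed reads of a list are exactly a slice
theorem map_pyGetD_eq_slice {α : Type} (xs : List α) (a b : Int) (d : α)
    (ha : 0 ≤ a) (hb0 : 0 ≤ b) (hb : b ≤ (xs.length : Int)) :
    (PySem.List.pyRange a b 1).map (fun j => PySem.List.pyGetD xs j d) =
      PySem.List.slice xs (some a) (some b) := by
  by_cases hab : b ≤ a
  · rw [PySem.List.pyRange_one_eq_nil hab, PySem.List.slice_toNat (ha := ha) (hb := hb0)]
    simp [List.take_eq_nil_iff]
    omega
  · push Not at hab
    have hsplit := PySem.List.pyRange_one_append a b (xs.length : Int) (le_of_lt hab) hb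
    have hfull := PySem.List.map_pyGetD_pyRange' (xs := xs) (a := a) (d := d) ha
    rw [hsplit, List.map_append] at hfull
    rw [PySem.List.slice_toNat (ha := ha) (hb := hb0)]
    have hlen : ((PySem.List.pyRange a b 1).map (fun j => PySem.List.pyGetD xs j d)).length
        = b.toNat - a.toNat := by
      simp [PySem.List.length_pyRange_one]; omega
    calc (PySem.List.pyRange a b 1).map (fun j => PySem.List.pyGetD xs j d)
        = (((PySem.List.pyRange a b 1).map (fun j => PySem.List.pyGetD xs j d)) ++
            ((PySem.List.pyRange b (xs.length : Int) 1).map (fun j => PySem.List.pyGetD xs j d))).take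
            (b.toNat - a.toNat) := by
          rw [List.take_append_of_le_length (by omega)]
          rw [List.take_of_length_le (by omega)]
      _ = (xs.drop a.toNat).take (b.toNat - a.toNat) := by rw [← hfull]

-- proof-only helpers naming A's two extremum scans and the two rectangle sums
def fminUpd (m : List (List Int)) (i : Int) : Int × Int × Int → Int → Int × Int × Int :=
  fun s j => if cell m i j < s.1 then (cell m i j, i, j) else s

def fmaxUpd (m : List (List Int)) (i : Int) : Int × Int × Int → Int → Int × Int × Int :=
  fun s j => if cell m i j > s.1 then (cell m i j, i, j) else s

def fmin (m : List (List Int)) : Int × Int × Int :=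
  (PySem.List.pyRange 0 (m.length : Int) 1).foldl (fun s i =>
    (PySem.List.pyRange 0 (m.length : Int) 1).foldl (fminUpd m i) s)
    (cell m 0 0, 0, 0)

def fmax (m : List (List Int)) : Int × Int × Int :=
  (PySem.List.pyRange 0 (m.length : Int) 1).foldl (fun s i =>
    (PySem.List.pyRange 0 (m.length : Int) 1).foldl (fmaxUpd m i) s)
    (cell m 0 0, 0, 0)

def rectRange (m : List (List Int)) (s0 s1 e0 e1 : Int) : Int :=
  (PySem.List.pyRange s0 (e0 + 1) 1).foldl (fun s i =>
    (PySem.List.pyRange (s1 + 1) e1 1).foldl (fun s j => s + cell m i j) s) 0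

def rectSlice (m : List (List Int)) (s0 s1 e0 e1 : Int) : Int :=
  ((PySem.List.slice m (some s0) (some (e0 + 1))).map
    (fun row => (PySem.List.slice row (some (s1 + 1)) (some e1)).sum)).sum

theorem min_eq (m : List (List Int)) :
    minInMatrix m = [(fmin m).2.1, (fmin m).2.2] := rfl

theorem max_eq (m : List (List Int)) :
    maxInMatrix m = [(fmax m).2.1, (fmax m).2.2] := rfl

-- A's min scan IS a fold of the pure min-step over the flattened cell list
theorem fmin_as_cells (m : List (List Int)) :
    fmin m = (cellsOf m).foldl (fun s x => if x.1 < s.1 then x else s)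
      (cell m 0 0, 0, 0) := by
  unfold fmin cellsOf fminUpd
  rw [List.foldl_flatten, List.foldl_map]
  simp only [List.foldl_map]

theorem fmax_as_cells (m : List (List Int)) :
    fmax m = (cellsOf m).foldl (fun s x => if s.1 < x.1 then x else s)
      (cell m 0 0, 0, 0) := by
  unfold fmax cellsOf fmaxUpd
  rw [List.foldl_flatten, List.foldl_map]
  simp only [List.foldl_map, gt_iff_lt]

-- Python min/max (first extremal) on a nonempty list is the running-extremum fold
theorem min?_head {α : Type} (key : α → Int) (c0 : α) (t : List α) (d : α) :
    (PySem.List.min? (c0 :: t) key).getD d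
      = t.foldl (fun s x => if key x < key s then x else s) c0 := by
  induction t generalizing c0 with
  | nil => simp [PySem.List.min?]
  | cons x xs ih =>
      have hstep : PySem.List.min? (c0 :: x :: xs) key
          = PySem.List.min? ((if key x < key c0 then x else c0) :: xs) key := by
        simp only [PySem.List.min?, List.foldl_cons]
        by_cases h : key x < key c0 <;> simp [h]
      rw [hstep, ih]
      simp only [List.foldl_cons]

theorem max?_head {α : Type} (key : α → Int) (c0 : α) (t : List α) (d : α) :
    (PySem.List.max? (c0 :: t) key).getD d
      = t.foldl (fun s x => if key s < key x then x else s) c0 := by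
  induction t generalizing c0 with
  | nil => simp [PySem.List.max?]
  | cons x xs ih =>
      have hstep : PySem.List.max? (c0 :: x :: xs) key
          = PySem.List.max? ((if key c0 < key x then x else c0) :: xs) key := by
        simp only [PySem.List.max?, List.foldl_cons]
        by_cases h : key c0 < key x <;> simp [h]
      rw [hstep, ih]
      simp only [List.foldl_cons]

theorem cells_cons (m : List (List Int)) (hm : m ≠ []) :
    ∃ t, cellsOf m = (cell m 0 0, 0, 0) :: t := by
  have hn : (0 : Int) < (m.length : Int) := by
    have := List.length_pos_of_ne_nil hm; exact_mod_cast this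
  have hr := PySem.List.pyRange_one_cons hn
  unfold cellsOf
  rw [hr]
  simp only [List.map_cons, List.flatten_cons, List.cons_append]
  exact ⟨_, rfl⟩

theorem min?_eq_fmin (m : List (List Int)) (hm : m ≠ []) :
    (PySem.List.min? (cellsOf m) (fun t => t.1)).getD (0, 0, 0) = fmin m := by
  obtain ⟨t, ht⟩ := cells_cons m hm
  rw [fmin_as_cells, ht, min?_head, List.foldl_cons]
  simp

theorem max?_eq_fmax (m : List (List Int)) (hm : m ≠ []) :
    (PySem.List.max? (cellsOf m) (fun t => t.1)).getD (0, 0, 0) = fmax m := by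
  obtain ⟨t, ht⟩ := cells_cons m hm
  rw [fmax_as_cells, ht, max?_head, List.foldl_cons]
  simp

-- the scan's recorded position stays inside the square [0,n) x [0,n)
theorem scan_pos_range (m : List (List Int)) (hm : m ≠ [])
    (upd : Int → Int × Int × Int → Int → Int × Int × Int)
    (hupd : ∀ i s j, (upd i s j).2 = s.2 ∨ (upd i s j).2 = (i, j)) :
    let r := ((PySem.List.pyRange 0 (m.length : Int) 1).foldl (fun s i =>
      (PySem.List.pyRange 0 (m.length : Int) 1).foldl (upd i) s)
      (cell m 0 0, ((0 : Int), (0 : Int)))).2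
    0 ≤ r.1 ∧ r.1 < (m.length : Int) ∧ 0 ≤ r.2 ∧ r.2 < (m.length : Int) := by
  have hn' : 0 < m.length := List.length_pos_of_ne_nil hm
  have hn : (0 : Int) < (m.length : Int) := by exact_mod_cast hn'
  refine foldl_invariant
    (fun s : Int × Int × Int =>
      0 ≤ s.2.1 ∧ s.2.1 < (m.length : Int) ∧ 0 ≤ s.2.2 ∧ s.2.2 < (m.length : Int))
    (PySem.List.pyRange 0 (m.length : Int) 1)
    (fun s i => (PySem.List.pyRange 0 (m.length : Int) 1).foldl (upd i) s)
    (cell m 0 0, ((0 : Int), (0 : Int)))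
    ⟨le_refl 0, hn, le_refl 0, hn⟩ ?_
  intro s i hi hs
  have hi' := (PySem.List.mem_pyRange_one).mp hi
  refine foldl_invariant
    (fun s : Int × Int × Int =>
      0 ≤ s.2.1 ∧ s.2.1 < (m.length : Int) ∧ 0 ≤ s.2.2 ∧ s.2.2 < (m.length : Int))
    (PySem.List.pyRange 0 (m.length : Int) 1) (upd i) s hs ?_
  intro s' j hj hs'
  have hj' := (PySem.List.mem_pyRange_one).mp hj
  rcases hupd i s' j with h | h <;> rw [h]
  · exact hs'
  · exact ⟨by omega, by omega, by omega, by omega⟩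

theorem fmin_pos (m : List (List Int)) (hm : m ≠ []) :
    0 ≤ (fmin m).2.1 ∧ (fmin m).2.1 < (m.length : Int) ∧
      0 ≤ (fmin m).2.2 ∧ (fmin m).2.2 < (m.length : Int) := by
  refine scan_pos_range m hm (fminUpd m) ?_
  intro i s j
  unfold fminUpd
  split <;> simp

theorem fmax_pos (m : List (List Int)) (hm : m ≠ []) :
    0 ≤ (fmax m).2.1 ∧ (fmax m).2.1 < (m.length : Int) ∧
      0 ≤ (fmax m).2.2 ∧ (fmax m).2.2 < (m.length : Int) := by
  refine scan_pos_range m hm (fmaxUpd m) ?_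
  intro i s j
  unfold fmaxUpd
  split <;> simp

-- the index-loop rectangle sum equals the slice rectangle sum
theorem rect_eq (m : List (List Int)) (hrows : ∀ row ∈ m, m.length ≤ row.length)
    (s0 s1 e0 e1 : Int) (h0 : 0 ≤ s0) (h1 : 0 ≤ s1) (he00 : 0 ≤ e0)
    (he0 : e0 < (m.length : Int)) (he1 : 0 ≤ e1) (he1' : e1 ≤ (m.length : Int)) :
    rectRange m s0 s1 e0 e1 = rectSlice m s0 s1 e0 e1 := by
  unfold rectRange rectSlice
  rw [foldl_congr_of_mem _ _
    (fun s i => s + (PySem.List.slice (PySem.List.pyGetD m i []) (some (s1 + 1)) (some e1)).sum) _ ?_]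
  · rw [PySem.List.foldl_add]
    have hmm : (PySem.List.pyRange s0 (e0 + 1) 1).map
        (fun i => (PySem.List.slice (PySem.List.pyGetD m i []) (some (s1 + 1)) (some e1)).sum)
      = ((PySem.List.pyRange s0 (e0 + 1) 1).map (fun i => PySem.List.pyGetD m i [])).map
        (fun row => (PySem.List.slice row (some (s1 + 1)) (some e1)).sum) := by
      rw [List.map_map]; rfl
    rw [hmm, map_pyGetD_eq_slice m s0 (e0 + 1) [] h0 (by omega) (by omega)]
    simp
  · intro s i hi
    have hi' := (PySem.List.mem_pyRange_one).mp hi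
    have hmem : PySem.List.pyGetD m i [] ∈ m :=
      PySem.List.pyGetD_mem (xs := m) (i := i) (d := [])
        (by unfold PySem.Raise.InRange; omega)
    have hlen := hrows _ hmem
    show (PySem.List.pyRange (s1 + 1) e1 1).foldl (fun s j => s + cell m i j) s
      = s + (PySem.List.slice (PySem.List.pyGetD m i []) (some (s1 + 1)) (some e1)).sum
    rw [PySem.List.foldl_add]
    rw [show cell m i = (fun j => PySem.List.pyGetD (PySem.List.pyGetD m i []) j 0) from rfl]
    rw [map_pyGetD_eq_slice (PySem.List.pyGetD m i []) (s1 + 1) e1 0 (by omega) he1 (by omega)]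

-- the rectangle is empty when the column strip is
theorem rectRange_zero (m : List (List Int)) (s0 s1 e0 e1 : Int) (h : e1 ≤ s1 + 1) :
    rectRange m s0 s1 e0 e1 = 0 := by
  unfold rectRange
  rw [PySem.List.pyRange_one_eq_nil h]
  have : ∀ l : List Int, l.foldl (fun (s : Int) (_ : Int) => s) 0 = 0 := by
    intro l; induction l with
    | nil => rfl
    | cons x xs ih => simp only [List.foldl_cons]; exact ih
  simp only [List.foldl_nil]
  exact this _

-- the prefix-sum list built by B's inner loop, characterised
theorem pref_general (row : List Int) (a : Int) (l : List Int) :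
    (row.foldl (fun st v => (st.1 + v, st.2 ++ [st.1 + v])) (a, l)).2
      = l ++ (List.range row.length).map (fun k => a + (row.take (k + 1)).sum) := by
  induction row generalizing a l with
  | nil => simp
  | cons v vs ih =>
      simp only [List.foldl_cons]
      rw [ih]
      rw [List.length_cons, List.range_succ_eq_map]
      simp [List.map_map, Function.comp_def, List.append_assoc, add_assoc]

theorem pref_get (row : List Int) (k : Nat) (hk : k ≤ row.length) :
    PySem.List.pyGetD (prefList row) (k : Int) 0 = (row.take k).sum := by
  unfold prefList
  rw [pref_general]
  simp only [zero_add, PySem.List.pyGetD_natCast]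
  cases k with
  | zero => simp
  | succ j =>
      have hj : j < row.length := by omega
      simp [List.getD, hj]

theorem pref_diff (row : List Int) (lo hi : Int) (h0 : 0 ≤ lo) (hlh : lo ≤ hi)
    (hhi : hi ≤ (row.length : Int)) :
    PySem.List.pyGetD (prefList row) hi 0 - PySem.List.pyGetD (prefList row) lo 0
      = (PySem.List.slice row (some lo) (some hi)).sum := by
  have hlo' : lo = (lo.toNat : Int) := (Int.toNat_of_nonneg h0).symm
  have hhi' : hi = (hi.toNat : Int) := (Int.toNat_of_nonneg (by omega)).symm
  rw [hlo', hhi', pref_get row lo.toNat (by omega), pref_get row hi.toNat (by omega),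
    PySem.List.slice_natCast]
  have hsplit : row.take hi.toNat
      = row.take lo.toNat ++ (row.drop lo.toNat).take (hi.toNat - lo.toNat) := by
    rw [← List.take_add]
    congr 1
    omega
  rw [hsplit, List.sum_append]
  ring

-- B's row loop over the sliced matrix is the slice rectangle sum
theorem strip_eq (m : List (List Int)) (hrows : ∀ row ∈ m, m.length ≤ row.length)
    (s0 s1 e0 e1 : Int) (h1 : 0 ≤ s1) (he1 : e1 ≤ (m.length : Int)) (hlt : s1 + 1 ≤ e1) :
    (PySem.List.slice m (some s0) (some (e0 + 1))).foldl
      (fun total row =>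
        total + (PySem.List.pyGetD (prefList row) e1 0 - PySem.List.pyGetD (prefList row) (s1 + 1) 0)) 0
      = rectSlice m s0 s1 e0 e1 := by
  rw [foldl_congr_of_mem _ _
    (fun total row => total + (PySem.List.slice row (some (s1 + 1)) (some e1)).sum) _ ?_]
  · rw [PySem.List.foldl_add]
    unfold rectSlice
    simp
  · intro s row hrow
    have hmem := PySem.List.mem_of_mem_slice m _ _ hrow
    have hlen := hrows _ hmem
    have hle : e1 ≤ (row.length : Int) := le_trans he1 (by exact_mod_cast hlen)
    rw [pref_diff row (s1 + 1) e1 (by omega) hlt hle]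

theorem pyGetD_pair_zero (x y : Int) : PySem.List.pyGetD [x, y] 0 0 = x := rfl

theorem pyGetD_pair_one (x y : Int) : PySem.List.pyGetD [x, y] 1 0 = y := rfl

-- B, rewritten through A's scans: ordered corners, empty-strip guard, slice rectangle
theorem alt_eq (m : List (List Int)) (hm : m ≠ [])
    (hrows : ∀ row ∈ m, m.length ≤ row.length) :
    sumInBetween_alt m =
      if (fmax m).2.1 < (fmin m).2.1 ∨ ((fmax m).2.1 = (fmin m).2.1 ∧ (fmax m).2.2 < (fmin m).2.2)
      then (if (fmin m).2.2 ≤ (fmax m).2.2 + 1 then 0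
            else rectSlice m (fmax m).2.1 (fmax m).2.2 (fmin m).2.1 (fmin m).2.2)
      else (if (fmax m).2.2 ≤ (fmin m).2.2 + 1 then 0
            else rectSlice m (fmin m).2.1 (fmin m).2.2 (fmax m).2.1 (fmax m).2.2) := by
  obtain ⟨ha0, ha1, hb0, hb1⟩ := fmin_pos m hm
  obtain ⟨hc0, hc1, hd0, hd1⟩ := fmax_pos m hm
  unfold sumInBetween_alt
  simp only [min?_eq_fmin m hm, max?_eq_fmax m hm]
  by_cases hc : (fmax m).2.1 < (fmin m).2.1 ∨
      ((fmax m).2.1 = (fmin m).2.1 ∧ (fmax m).2.2 < (fmin m).2.2)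
  · simp only [if_pos hc]
    by_cases hz : (fmin m).2.2 ≤ (fmax m).2.2 + 1
    · simp only [if_pos hz]
    · simp only [if_neg hz]
      exact strip_eq m hrows (fmax m).2.1 (fmax m).2.2 (fmin m).2.1 (fmin m).2.2
        hd0 (by omega) (by omega)
  · simp only [if_neg hc]
    by_cases hz : (fmax m).2.2 ≤ (fmin m).2.2 + 1
    · simp only [if_pos hz]
    · simp only [if_neg hz]
      exact strip_eq m hrows (fmin m).2.1 (fmin m).2.2 (fmax m).2.1 (fmax m).2.2
        hb0 (by omega) (by omega)

-- ===== VERDICT (by name: the statement is the Claim_ definition above) =====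
theorem sumInBetween_spec : Claim_equal_sumInBetween := by
  intro matrix _hdom hpre
  obtain ⟨hne, hrows⟩ := hpre
  unfold Spec_sumInBetween
  rw [alt_eq matrix hne hrows]
  unfold sumInBetween
  rw [min_eq, max_eq]
  obtain ⟨ha0, ha1, hb0, hb1⟩ := fmin_pos matrix hne
  obtain ⟨hc0, hc1, hd0, hd1⟩ := fmax_pos matrix hne
  rcases emin : (fmin matrix).2 with ⟨a, b⟩
  rcases emax : (fmax matrix).2 with ⟨c, d⟩
  rw [emin] at ha0 ha1 hb0 hb1
  rw [emax] at hc0 hc1 hd0 hd1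
  dsimp only at ha0 ha1 hb0 hb1 hc0 hc1 hd0 hd1 ⊢
  simp only [pyGetD_pair_zero, pyGetD_pair_one]
  split_ifs with h1 h2 h3 h4 h5 h6 h7 h8 h9 h10 <;>
    simp only [pyGetD_pair_zero, pyGetD_pair_one] <;>
    first
      | omega
      | (exact rectRange_zero matrix a b c d (by omega))
      | (exact rectRange_zero matrix c d a b (by omega))
      | (exact rect_eq matrix hrows a b c d ha0 hb0 (by omega) (by omega) (by omega) (by omega))
      | (exact rect_eq matrix hrows c d a b hc0 hd0 (by omega) (by omega) (by omega) (by omega))
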